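-- pv_equiv track=rewrite | github.com/Klaudia1303/student_code_analysis | Progetto-tirocinio2024/data/student_data/2061918_Sammarco/LabPython07/A_Ex2.py | A_Ex2
-- ===== SOURCE A (Python) =====
-- def A_Ex2(start,n):
--     l3=[]
--     if n==0:
--         l3=[]
--     for i in range(n):
--         if i!=0:
--             start+=2
--         if start%2!=0:
--             l3.append(start)
--         if start%2==0:
--             start=start+1
--             l3.append(start)
--     return l3
-- ===== SOURCE B (Python) =====
-- def A_Ex2(start, n):
--     first = start if start % 2 != 0 else start + 1
--     return [first + 2 * i for i in range(n)]
-- ===== Notes on version B (the rewrite author's own statement) =====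
-- stated objective: simpler
-- what changed: B computes the first odd value once and returns the arithmetic progression first+2*i by a closed-form index formula, removing A's per-iteration parity tests, appends and mutation of start.
import Mathlib
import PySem

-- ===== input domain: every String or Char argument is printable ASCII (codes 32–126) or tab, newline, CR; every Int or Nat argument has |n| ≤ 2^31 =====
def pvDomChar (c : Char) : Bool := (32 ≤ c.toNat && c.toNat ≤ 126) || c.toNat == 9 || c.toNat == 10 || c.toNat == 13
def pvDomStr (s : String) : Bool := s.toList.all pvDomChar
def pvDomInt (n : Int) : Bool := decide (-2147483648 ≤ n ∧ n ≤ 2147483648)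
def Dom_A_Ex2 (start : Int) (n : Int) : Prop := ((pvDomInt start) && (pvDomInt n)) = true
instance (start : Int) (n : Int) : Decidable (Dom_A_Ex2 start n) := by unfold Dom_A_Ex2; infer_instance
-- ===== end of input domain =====

-- B computes the first odd value once and returns the progression by a closed-form index formula (simpler: no per-step parity tests or mutation).


-- ===== PORT A =====
-- one loop-body step of A: the three successive ifs, mutating (start, l3)
def A_Ex2_step (st : Int × List Int) (i : Int) : Int × List Int :=
  let s1 := if i ≠ 0 then st.1 + 2 else st.1
  let l1 := if PySem.Int.mod s1 2 ≠ 0 then st.2 ++ [s1] else st.2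
  if PySem.Int.mod s1 2 = 0 then (s1 + 1, l1 ++ [s1 + 1]) else (s1, l1)

def A_Ex2 (start : Int) (n : Int) : List Int :=
  let l3 : List Int := []
  let l3 := if n = 0 then [] else l3
  ((PySem.List.pyRange 0 n 1).foldl A_Ex2_step (start, l3)).2

-- ===== PORT B =====
def A_Ex2_alt (start : Int) (n : Int) : List Int :=
  let first := if PySem.Int.mod start 2 ≠ 0 then start else start + 1
  (PySem.List.pyRange 0 n 1).map (fun i => first + 2 * i)

-- ===== PRECONDITION & SPEC =====
def Spec_A_Ex2 (start : Int) (n : Int) (out : List Int) : Prop := out = A_Ex2_alt start n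
instance (start : Int) (n : Int) (out : List Int) : Decidable (Spec_A_Ex2 start n out) := by unfold Spec_A_Ex2; infer_instance

-- ===== CLAIM (what is proved, stated in full; the proofs are below) =====
def Claim_equal_A_Ex2 : Prop := ∀ (start : Int) (n : Int), Dom_A_Ex2 start n → Spec_A_Ex2 start n (A_Ex2 start n)

-- ===== LEMMAS AND PROOFS =====

lemma mod_two_ne (s : Int) (h : s % 2 = 1) : PySem.Int.mod s 2 ≠ 0 := by
  rw [PySem.Int.mod_eq_emod_of_pos (by omega)]; omega

lemma A_Ex2_loop (start : Int) (m : Nat) :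
    (((List.range m).map (fun k : Nat => (k : Int))).foldl A_Ex2_step (start, [])) =
      (if m = 0 then (start, ([] : List Int))
       else
        let first := if PySem.Int.mod start 2 ≠ 0 then start else start + 1
        (first + 2 * ((m : Int) - 1), (List.range m).map (fun k : Nat => first + 2 * (k : Int)))) := by
  have hfodd : (if PySem.Int.mod start 2 ≠ 0 then start else start + 1) % 2 = 1 := by
    rw [PySem.Int.mod_eq_emod_of_pos (by omega)]
    split <;> omega
  induction m with
  | zero => simp
  | succ m ih =>
    simp only [List.range_succ, List.map_append, List.map_cons, List.map_nil, List.foldl_append]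
    rw [ih]
    cases m with
    | zero =>
      simp only [List.foldl_cons, List.foldl_nil]
      unfold A_Ex2_step
      simp only [Nat.cast_zero, ne_eq, not_true_eq_false, if_false, reduceIte]
      by_cases h : PySem.Int.mod start 2 = 0
      · simp only [h, not_true_eq_false, if_false, reduceIte]
        norm_num
      · simp only [if_neg h, if_pos h]
        norm_num
    | succ k =>
      simp only [Nat.succ_ne_zero, reduceIte, List.foldl_cons, List.foldl_nil]
      set first := if PySem.Int.mod start 2 ≠ 0 then start else start + 1 with hfirst
      unfold A_Ex2_step
      have h1 : ((k + 1 : Nat) : Int) ≠ 0 := by push_cast; omega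
      have hodd : (first + 2 * (((k + 1 : Nat) : Int) - 1) + 2) % 2 = 1 := by omega
      simp only [ne_eq, h1, not_false_eq_true, if_pos,
        mod_two_ne _ hodd, reduceIte]
      simp only [List.range_succ, List.map_append, List.map_cons, List.map_nil, Prod.mk.injEq]
      constructor
      · push_cast; ring
      · congr 2
        push_cast; ring

-- ===== VERDICT (by name: the statement is the Claim_ definition above) =====
theorem A_Ex2_spec : Claim_equal_A_Ex2 := by
  intro start n _
  unfold Spec_A_Ex2 A_Ex2 A_Ex2_alt
  rw [PySem.List.pyRange_one]
  simp only [Int.sub_zero, zero_add, ite_self]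
  rw [A_Ex2_loop, List.map_map]
  rcases Nat.eq_zero_or_pos n.toNat with h | h
  · simp [h]
  · simp only [if_neg (by omega : ¬ n.toNat = 0)]
    simp [Function.comp]
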